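-- pv_equiv track=rewrite | github.com/lufuhao/MEC | bin/mec.py | pos_to_interval
-- ===== SOURCE A (Python) =====
-- def pos_to_interval(pos_list,minlen):
--
--     """
--         Function to invert pos list to the interval if pos is contiguous.
--         return: the interval that does not contain misassembly error.
--
--         Arguments:
--         pos_list: the list of pos
--
--      """
--     interval = []
--     if len(pos_list)>=2:
--         start = pos_list[0]
--         end = pos_list[0]
--         for i in pos_list[1:]:
--             if i-end == 1:
--                 end = i
--             else:
--                 if end - start >minlen:
--                     interval.append((start, end))
--                 start = i
--                 end = i
--         if end - start >minlen:
--             interval.append((start, end))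
--     else:
--         interval = []
--     return interval
-- ===== SOURCE B (Python) =====
-- def pos_to_interval(pos_list, minlen):
--     # Boundary-index formulation: instead of scanning with running run state,
--     # compute the set of break positions (indices where consecutive elements
--     # are not successors), derive the run starts and run ends positionally,
--     # and zip them into intervals, keeping those longer than minlen.
--     if len(pos_list) < 2:
--         return []
--     breaks = [i for i in range(len(pos_list) - 1)
--               if pos_list[i + 1] - pos_list[i] != 1]
--     starts = [pos_list[0]] + [pos_list[i + 1] for i in breaks]
--     ends = [pos_list[i] for i in breaks] + [pos_list[-1]]
--     return [(s, e) for s, e in zip(starts, ends) if e - s > minlen]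
-- ===== Notes on version B (the rewrite author's own statement) =====
-- stated objective: alternative
-- what changed: B replaces A's stateful single scan (running start/end with conditional flushes) by a positional boundary-index computation: it lists the indices where consecutive elements are not successors, reads the run starts and run ends off those indices, and zips them into the surviving intervals.
import Mathlib
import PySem

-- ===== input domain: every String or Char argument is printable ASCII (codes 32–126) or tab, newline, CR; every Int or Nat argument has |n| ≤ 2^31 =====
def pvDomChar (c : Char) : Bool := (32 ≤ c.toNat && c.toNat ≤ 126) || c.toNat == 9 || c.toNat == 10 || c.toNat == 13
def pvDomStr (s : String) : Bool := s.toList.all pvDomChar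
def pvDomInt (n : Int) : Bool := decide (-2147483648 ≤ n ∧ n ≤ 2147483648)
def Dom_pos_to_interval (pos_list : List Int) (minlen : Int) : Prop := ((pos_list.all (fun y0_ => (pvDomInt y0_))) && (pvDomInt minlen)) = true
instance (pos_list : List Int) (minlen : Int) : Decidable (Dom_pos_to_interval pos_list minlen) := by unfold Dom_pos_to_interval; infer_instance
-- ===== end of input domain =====

-- B computes break indices positionally and zips run starts with run ends,
-- instead of A's stateful scan (an alternative algorithm; no speed claim).

-- ===== PORT A =====
-- Literal transliteration of A: one fold over pos_list[1:] carrying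
-- (interval, start, end), flushing on each gap and once after the loop.
def pos_to_interval (pos_list : List Int) (minlen : Int) : List (Int × Int) :=
  if pos_list.length ≥ 2 then
    match pos_list with
    | [] => []
    | p0 :: rest =>
      let s := rest.foldl (fun (st : List (Int × Int) × Int × Int) i =>
        if i - st.2.2 == 1 then (st.1, st.2.1, i)
        else ((if st.2.2 - st.2.1 > minlen then st.1 ++ [(st.2.1, st.2.2)] else st.1), i, i))
        ([], p0, p0)
      if s.2.2 - s.2.1 > minlen then s.1 ++ [(s.2.1, s.2.2)] else s.1
  else []

-- ===== PORT B =====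
-- Transliteration of Source B.  range(len-1) yields only in-range indices, so
-- pos_list[i] / pos_list[i+1] are ported exactly by getD with a dummy default;
-- pos_list[-1] on the guarded (nonempty) list is exactly getLast!.
def pos_to_interval_alt (pos_list : List Int) (minlen : Int) : List (Int × Int) :=
  if pos_list.length < 2 then []
  else
    let breaks := (List.range (pos_list.length - 1)).filter
      (fun i => decide (pos_list.getD (i + 1) 0 - pos_list.getD i 0 ≠ 1))
    let starts := pos_list.getD 0 0 :: breaks.map (fun i => pos_list.getD (i + 1) 0)
    let ends := breaks.map (fun i => pos_list.getD i 0) ++ [pos_list.getLast!]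
    (starts.zip ends).filter (fun se => decide (se.2 - se.1 > minlen))

-- ===== PRECONDITION & SPEC =====
def Spec_pos_to_interval (pos_list : List Int) (minlen : Int) (out : List (Int × Int)) : Prop := out = pos_to_interval_alt pos_list minlen
instance (pos_list : List Int) (minlen : Int) (out : List (Int × Int)) : Decidable (Spec_pos_to_interval pos_list minlen out) := by unfold Spec_pos_to_interval; infer_instance

-- ===== CLAIM (what is proved, stated in full; the proofs are below) =====
def Claim_equal_pos_to_interval : Prop := ∀ (pos_list : List Int) (minlen : Int), Dom_pos_to_interval pos_list minlen → Spec_pos_to_interval pos_list minlen (pos_to_interval pos_list minlen)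

-- ===== LEMMAS AND PROOFS =====

-- Common recursive reference: process the remaining positions with current
-- run (s, e), emitting (s, e) whenever a run longer than minlen closes.
def pvGo (minlen s e : Int) : List Int → List (Int × Int)
  | [] => if e - s > minlen then [(s, e)] else []
  | i :: rest =>
      if i - e = 1 then pvGo minlen s i rest
      else (if e - s > minlen then [(s, e)] else []) ++ pvGo minlen i i rest

-- A's fold plus final flush equals the accumulator followed by pvGo.
theorem pvA_loop (minlen : Int) (rest : List Int) :
    ∀ (interval : List (Int × Int)) (s e : Int),
      (let st := rest.foldl (fun (st : List (Int × Int) × Int × Int) i =>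
          if i - st.2.2 == 1 then (st.1, st.2.1, i)
          else ((if st.2.2 - st.2.1 > minlen then st.1 ++ [(st.2.1, st.2.2)] else st.1), i, i))
          (interval, s, e)
       if st.2.2 - st.2.1 > minlen then st.1 ++ [(st.2.1, st.2.2)] else st.1)
      = interval ++ pvGo minlen s e rest := by
  induction rest with
  | nil =>
    intro interval s e
    simp only [List.foldl_nil, pvGo]
    split <;> simp
  | cons i rest ih =>
    intro interval s e
    simp only [List.foldl_cons, pvGo]
    by_cases h : i - e = 1
    · simp only [h, beq_self_eq_true, if_pos]
      simpa using ih interval s i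
    · have hb : (i - e == 1) = false := by simp [h]
      simp only [hb, Bool.false_eq_true, if_false, if_neg h]
      by_cases hf : e - s > minlen
      · simp only [if_pos hf]
        rw [ih (interval ++ [(s, e)]) i i, List.append_assoc]
      · simp only [if_neg hf]
        rw [ih interval i i]
        simp

-- B's zip-of-boundaries computation on x :: rest, with the first start
-- overridden to s, equals pvGo minlen s x rest.
theorem pvB_loop (minlen : Int) (rest : List Int) :
    ∀ (s x : Int),
      ((s :: (((List.range ((x :: rest).length - 1)).filter
          (fun i => decide ((x :: rest).getD (i + 1) 0 - (x :: rest).getD i 0 ≠ 1))).map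
            (fun i => (x :: rest).getD (i + 1) 0))).zip
        ((((List.range ((x :: rest).length - 1)).filter
          (fun i => decide ((x :: rest).getD (i + 1) 0 - (x :: rest).getD i 0 ≠ 1))).map
            (fun i => (x :: rest).getD i 0)) ++ [(x :: rest).getLast!])).filter
        (fun se => decide (se.2 - se.1 > minlen))
      = pvGo minlen s x rest := by
  induction rest with
  | nil =>
    intro s x
    simp only [pvGo, List.length_cons, List.length_nil]
    by_cases hc : x - s > minlen <;> norm_num [List.filter, hc]
  | cons y rest ih =>
    intro s x
    have hlen : (x :: y :: rest).length - 1 = rest.length + 1 := by simp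
    rw [hlen, List.range_succ_eq_map]
    have ep : ((fun i => decide ((x :: y :: rest).getD (i + 1) 0 - (x :: y :: rest).getD i 0 ≠ 1)) ∘ Nat.succ)
        = (fun i => decide ((y :: rest).getD (i + 1) 0 - (y :: rest).getD i 0 ≠ 1)) := by
      funext i; simp [Function.comp, Nat.succ_eq_add_one]
    have em : ((fun i => (x :: y :: rest).getD (i + 1) 0) ∘ Nat.succ)
        = (fun i => (y :: rest).getD (i + 1) 0) := by
      funext i; simp [Function.comp, Nat.succ_eq_add_one]
    have em2 : ((fun i => (x :: y :: rest).getD i 0) ∘ Nat.succ)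
        = (fun i => (y :: rest).getD i 0) := by
      funext i; simp [Function.comp, Nat.succ_eq_add_one]
    have el : (x :: y :: rest).getLast! = (y :: rest).getLast! := by
      simp [List.getLast!]
    have ihs : ∀ s' : Int,
        ((s' :: (((List.range rest.length).filter
            (fun i => decide ((y :: rest).getD (i + 1) 0 - (y :: rest).getD i 0 ≠ 1))).map
              (fun i => (y :: rest).getD (i + 1) 0))).zip
          ((((List.range rest.length).filter
            (fun i => decide ((y :: rest).getD (i + 1) 0 - (y :: rest).getD i 0 ≠ 1))).map
              (fun i => (y :: rest).getD i 0)) ++ [(y :: rest).getLast!])).filter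
          (fun se => decide (se.2 - se.1 > minlen))
        = pvGo minlen s' y rest := by
      intro s'
      have := ih s' y
      simpa using this
    by_cases h : y - x = 1
    · have h0 : (decide ((x :: y :: rest).getD (0 + 1) 0 - (x :: y :: rest).getD 0 0 ≠ 1)) = false := by
        simp [h]
      simp only [List.filter_cons, h0, Bool.false_eq_true, if_false, List.filter_map]
      rw [List.map_map, List.map_map, ep, em, em2, el]
      rw [ihs s]
      simp [pvGo, h]
    · have h0 : (decide ((x :: y :: rest).getD (0 + 1) 0 - (x :: y :: rest).getD 0 0 ≠ 1)) = true := by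
        simp [h]
      simp only [List.filter_cons, h0, if_true, List.filter_map, List.map_cons, List.map_map]
      rw [ep, em, em2, el]
      have hf0 : (x :: y :: rest).getD (0 + 1) 0 = y := rfl
      have hg0 : (x :: y :: rest).getD 0 0 = x := rfl
      rw [hf0, hg0]
      simp only [List.cons_append, List.zip_cons_cons, List.filter_cons]
      rw [ihs y]
      simp only [pvGo, if_neg h]
      by_cases hc : x - s > minlen <;> simp [hc]

-- ===== VERDICT (by name: the statement is the Claim_ definition above) =====
theorem pos_to_interval_spec : Claim_equal_pos_to_interval := by
  intro pos_list minlen _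
  unfold Spec_pos_to_interval pos_to_interval pos_to_interval_alt
  cases pos_list with
  | nil => simp
  | cons p0 rest =>
    cases rest with
    | nil => simp
    | cons p1 rest =>
      have h2 : (p0 :: p1 :: rest).length ≥ 2 := by simp
      have h2' : ¬ (p0 :: p1 :: rest).length < 2 := by simp
      simp only [if_pos h2, if_neg h2']
      rw [pvA_loop minlen (p1 :: rest) [] p0 p0]
      rw [← pvB_loop minlen (p1 :: rest) p0 p0]
      simp
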